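-- pv_equiv track=rewrite | github.com/pydeoxy/gh-py-tools | gol_2d_points.py | extract_sub_array
-- ===== SOURCE A (Python) =====
-- def add_zeros_around(array):
--   """
--   Adds 0s around a given 2D array.
--   """
--
--   # Get the dimensions of the input array
--   x, y = len(array), len(array[0])
--
--   # Create a new array with 0s around the input array
--   new_array = [[0 for _ in range(y + 2)] for _ in range(x + 2)]
--
--   # Copy the input array into the center of the new array
--   for i in range(x):
--     for j in range(y):
--       new_array[i + 1][j + 1] = array[i][j]
--
--   return new_array
--
-- def extract_sub_array(array, i, j):
--   """
--   Extracts a 3x3 sub-array from the given array at index (i, j).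
--   """
--
--   # Check if the given index is on the edge
--   x, y = len(array), len(array[0])
--   if i * j == 0 or (x-1-i) * (y-1-j) == 0:
--     extend = add_zeros_around(array)
--     sub_array = [
--       row[j  : j + 3] for row in extend[i  : i + 3]
--     ]
--   else:
--     sub_array = [
--       row[j - 1 : j + 2] for row in array[i - 1 : i + 2]
--     ]
--
--   return sub_array
-- ===== SOURCE B (Python) =====
-- def extract_sub_array(array, i, j):
--   """
--   Extracts a 3x3 sub-array from the given array at index (i, j).
--
--   At an edge index the window indices are taken from a slice of the
--   (padded) coordinate ranges and each cell is read directly from the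
--   array (0 for padding cells), so no padded copy of the array is built.
--   """
--   x, y = len(array), len(array[0])
--   if i * j == 0 or (x - 1 - i) * (y - 1 - j) == 0:
--     return [[array[r - 1][c - 1] if 1 <= r <= x and 1 <= c <= y else 0
--              for c in range(y + 2)[j:j + 3]]
--             for r in range(x + 2)[i:i + 3]]
--   return [row[j - 1:j + 2] for row in array[i - 1:i + 2]]
-- ===== Notes on version B (the rewrite author's own statement) =====
-- stated objective: alternative
-- what changed: On edge indices B slices the padded coordinate ranges for the window indices and reads each cell directly from the array (0 for padding cells) instead of allocating a full zero-padded (x+2)x(y+2) copy of the array and slicing 3x3 windows out of it; Pre_ excludes the empty array and (on the edge branch) arrays with a row shorter than the first row, on which A raises.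
import Mathlib
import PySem

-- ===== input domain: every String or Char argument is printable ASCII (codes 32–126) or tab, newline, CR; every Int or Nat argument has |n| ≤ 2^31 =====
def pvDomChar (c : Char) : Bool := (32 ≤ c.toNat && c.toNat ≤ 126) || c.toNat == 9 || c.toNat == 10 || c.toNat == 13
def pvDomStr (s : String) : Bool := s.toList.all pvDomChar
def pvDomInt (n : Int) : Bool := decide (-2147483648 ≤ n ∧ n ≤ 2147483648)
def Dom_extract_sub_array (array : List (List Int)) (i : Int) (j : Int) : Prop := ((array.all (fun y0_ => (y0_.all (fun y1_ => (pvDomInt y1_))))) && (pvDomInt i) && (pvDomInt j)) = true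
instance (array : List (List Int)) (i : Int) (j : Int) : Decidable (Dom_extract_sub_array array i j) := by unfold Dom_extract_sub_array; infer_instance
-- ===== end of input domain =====

-- B replaces A's zero-padded (x+2)x(y+2) copy on edge indices with a slice of the
-- padded coordinate ranges and direct cell reads (0 for padding cells).

-- ===== PORT A =====
-- add_zeros_around: y = len(array[0]) raises on an empty array (excluded by Pre_);
-- array[i][j] is ported with getD, exact because Pre_ only admits this branch when
-- every row has length ≥ len(array[0]) (on shorter rows Python raises here).
def add_zeros_around (array : List (List Int)) : List (List Int) :=
  let x := array.length
  let y := ((PySem.List.pyGet? array 0).getD []).length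
  let new_array := List.replicate (x + 2) (List.replicate (y + 2) (0 : Int))
  (List.range x).foldl (fun na i =>
    (List.range y).foldl (fun na j =>
      na.modify (i + 1) (fun row => row.set (j + 1) ((array.getD i []).getD j 0))) na) new_array

def extract_sub_array (array : List (List Int)) (i : Int) (j : Int) : List (List Int) :=
  let x : Int := array.length
  let y : Int := ((PySem.List.pyGet? array 0).getD []).length
  if i * j = 0 ∨ (x - 1 - i) * (y - 1 - j) = 0 then
    let extend := add_zeros_around array
    (PySem.List.slice extend (some i) (some (i + 3))).map
      (fun row => PySem.List.slice row (some j) (some (j + 3)))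
  else
    (PySem.List.slice array (some (i - 1)) (some (i + 2))).map
      (fun row => PySem.List.slice row (some (j - 1)) (some (j + 2)))

-- ===== PORT B =====
-- the guarded cell read array[r-1][c-1] of Source B's edge branch: the guard keeps both
-- indices nonnegative and in range, so the pyGet? defaults are exact (0 = padding).
def esaCell (array : List (List Int)) (x y r c : Int) : Int :=
  if 1 ≤ r ∧ r ≤ x ∧ 1 ≤ c ∧ c ≤ y then
    (PySem.List.pyGet? ((PySem.List.pyGet? array (r - 1)).getD []) (c - 1)).getD 0
  else 0

-- range(n) as its list of ints, list(range(n)) = pyRange 0 n; range(n)[a:b] is then a slice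
def rangeInts (n : Nat) : List Int := PySem.List.pyRange 0 (n : Int) 1

def extract_sub_array_alt (array : List (List Int)) (i : Int) (j : Int) : List (List Int) :=
  let x : Int := array.length
  let y : Int := ((PySem.List.pyGet? array 0).getD []).length
  if i * j = 0 ∨ (x - 1 - i) * (y - 1 - j) = 0 then
    (PySem.List.slice (rangeInts (array.length + 2)) (some i) (some (i + 3))).map (fun r =>
      (PySem.List.slice (rangeInts (((PySem.List.pyGet? array 0).getD []).length + 2))
          (some j) (some (j + 3))).map (fun c =>
        esaCell array x y r c))
  else
    (PySem.List.slice array (some (i - 1)) (some (i + 2))).map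
      (fun row => PySem.List.slice row (some (j - 1)) (some (j + 2)))

-- ===== PRECONDITION & SPEC =====
-- Pre_ excludes exactly the inputs on which A raises: the empty array (len(array[0])
-- is an IndexError), and edge-branch inputs with a row shorter than the first row
-- (add_zeros_around reads array[i][j] for every j < len(array[0]) and raises there).
def Pre_extract_sub_array (array : List (List Int)) (i : Int) (j : Int) : Prop :=
  array ≠ [] ∧
  ((i * j = 0 ∨ ((array.length : Int) - 1 - i) * (((array.headD []).length : Int) - 1 - j) = 0) →
    ∀ row ∈ array, (array.headD []).length ≤ row.length)
instance (array : List (List Int)) (i : Int) (j : Int) : Decidable (Pre_extract_sub_array array i j) := by unfold Pre_extract_sub_array; infer_instance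

def pvWitness_extract_sub_array : List (List Int) × Int × Int := ([[1, 2], [3, 4]], 0, 1)

def Spec_extract_sub_array (array : List (List Int)) (i : Int) (j : Int) (out : List (List Int)) : Prop := out = extract_sub_array_alt array i j
instance (array : List (List Int)) (i : Int) (j : Int) (out : List (List Int)) : Decidable (Spec_extract_sub_array array i j out) := by unfold Spec_extract_sub_array; infer_instance

-- ===== CLAIM (what is proved, stated in full; the proofs are below) =====
def Claim_equal_extract_sub_array : Prop := ∀ (array : List (List Int)) (i : Int) (j : Int), Dom_extract_sub_array array i j → Pre_extract_sub_array array i j → Spec_extract_sub_array array i j (extract_sub_array array i j)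

-- ===== LEMMAS AND PROOFS =====

-- the value both programs produce for cell (r, c) of the padded grid
def pcell (array : List (List Int)) (n m : Nat) (r c : Int) : Int :=
  if 1 ≤ r ∧ r ≤ (n : Int) ∧ 1 ≤ c ∧ c ≤ (m : Int) then
    (array.getD (r - 1).toNat []).getD (c - 1).toNat 0
  else 0

lemma modify_modify {α : Type} (l : List α) (k : Nat) (f g : α → α) :
    (l.modify k f).modify k g = l.modify k (fun a => g (f a)) := by
  induction l generalizing k with
  | nil => simp
  | cons a t ih =>
    cases k with
    | zero => simp [List.modify_cons]
    | succ k => simp [ih]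

lemma foldl_modify_fixed {α : Type} (k : Nat) (g : Nat → α → α) (na : List α) (l : List Nat) :
    l.foldl (fun na j => na.modify k (g j)) na
      = na.modify k (fun row => l.foldl (fun row j => g j row) row) := by
  induction l generalizing na with
  | nil => exact (List.modify_id k na).symm
  | cons a t ih => simp [List.foldl_cons, ih, modify_modify]

lemma modify_at_prefix_len {α : Type} (l1 l2 : List α) (f : α → α) :
    (l1 ++ l2).modify l1.length f = l1 ++ l2.modify 0 f := by
  induction l1 with
  | nil => simp
  | cons a t ih => simp [ih]

lemma modify_at_len' {α : Type} (l1 l2 : List α) (k : Nat) (hk : k = l1.length)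
    (f : α → α) : (l1 ++ l2).modify k f = l1 ++ l2.modify 0 f := by
  subst hk; exact modify_at_prefix_len l1 l2 f

lemma take_succ_getD (array : List (List Int)) (k : Nat) (hk : k < array.length) :
    array.take (k + 1) = array.take k ++ [array.getD k []] := by
  rw [List.getD_eq_getElem _ _ hk, List.take_add_one]
  simp [List.getElem?_eq_getElem hk]

lemma getD_len_ge (array : List (List Int)) (m k : Nat)
    (hrect : ∀ row ∈ array, m ≤ row.length) (hk : k < array.length) :
    m ≤ (array.getD k []).length := by
  rw [List.getD_eq_getElem _ _ hk]
  exact hrect _ (List.getElem_mem hk)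

lemma row_fill (v : List Int) (m k : Nat) (hk : k ≤ m) (hv : m ≤ v.length) :
    (List.range k).foldl (fun row j => row.set (j + 1) (v.getD j 0))
        (List.replicate (m + 2) (0 : Int))
      = 0 :: v.take k ++ List.replicate (m - k + 1) (0 : Int) := by
  induction k with
  | zero =>
    simp [List.replicate_succ]
  | succ k ih =>
    rw [List.range_succ, List.foldl_append, ih (by omega)]
    simp only [List.foldl_cons, List.foldl_nil]
    have h1 : (0 :: v.take k).length = k + 1 := by simp; omega
    have hrep : List.replicate (m - k + 1) (0 : Int)
        = (0 : Int) :: List.replicate (m - k) (0 : Int) := by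
      rw [← List.replicate_succ]
    have h2 : ((0 :: v.take k) ++ List.replicate (m - k + 1) (0 : Int)).set (k + 1) (v.getD k 0)
        = (0 :: v.take k) ++ (List.replicate (m - k + 1) (0 : Int)).set 0 (v.getD k 0) := by
      rw [List.set_append]
      simp [h1]
    rw [show (0 :: v.take k ++ List.replicate (m - k + 1) (0:Int)).set (k+1) (v.getD k 0)
        = ((0 :: v.take k) ++ List.replicate (m - k + 1) (0:Int)).set (k+1) (v.getD k 0) by simp, h2, hrep]
    have htake : v.take (k + 1) = v.take k ++ [v.getD k 0] := by
      rw [List.getD_eq_getElem v 0 (by omega), List.take_add_one]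
      simp [List.getElem?_eq_getElem (by omega : k < v.length)]
    rw [htake]
    rw [show m - k = (m - (k + 1)) + 1 by omega, List.replicate_succ]
    simp

lemma aza_aux (array : List (List Int)) (m : Nat)
    (hrect : ∀ row ∈ array, m ≤ row.length) (k : Nat) (hk : k ≤ array.length) :
    (List.range k).foldl (fun na i =>
        (List.range m).foldl (fun na j =>
          na.modify (i + 1) (fun row => row.set (j + 1) ((array.getD i []).getD j 0))) na)
      (List.replicate (array.length + 2) (List.replicate (m + 2) (0 : Int)))
      = List.replicate (m + 2) (0 : Int)
        :: (array.take k).map (fun v => 0 :: v.take m ++ [(0 : Int)])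
        ++ List.replicate (array.length - k + 1) (List.replicate (m + 2) (0 : Int)) := by
  induction k with
  | zero =>
    simp [List.replicate_succ]
  | succ k ih =>
    rw [List.range_succ, List.foldl_append, ih (by omega)]
    simp only [List.foldl_cons, List.foldl_nil]
    rw [foldl_modify_fixed]
    have hpre : (List.replicate (m + 2) (0 : Int)
        :: (array.take k).map (fun v => 0 :: v.take m ++ [(0 : Int)])).length = k + 1 := by
      simp; omega
    have hsplit : (List.replicate (m + 2) (0 : Int)
          :: (array.take k).map (fun v => 0 :: v.take m ++ [(0 : Int)])
          ++ List.replicate (array.length - k + 1) (List.replicate (m + 2) (0 : Int)))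
        = (List.replicate (m + 2) (0 : Int)
          :: (array.take k).map (fun v => 0 :: v.take m ++ [(0 : Int)]))
          ++ List.replicate (array.length - k + 1) (List.replicate (m + 2) (0 : Int)) := by
      simp
    rw [hsplit, modify_at_len' _ _ (k + 1) hpre.symm]
    rw [show List.replicate (array.length - k + 1) (List.replicate (m + 2) (0 : Int))
        = List.replicate (m + 2) (0 : Int)
          :: List.replicate (array.length - k) (List.replicate (m + 2) (0 : Int)) from List.replicate_succ]
    simp only [List.modify_cons]
    rw [row_fill (array.getD k []) m m le_rfl (getD_len_ge array m k hrect (by omega))]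
    rw [Nat.sub_self]
    rw [take_succ_getD array k (by omega)]
    rw [show array.length - k = (array.length - (k + 1)) + 1 by omega, List.replicate_succ]
    simp

lemma aza_eq (array : List (List Int)) (m : Nat)
    (hrect : ∀ row ∈ array, m ≤ row.length)
    (hy : ((PySem.List.pyGet? array 0).getD []).length = m) :
    add_zeros_around array
      = List.replicate (m + 2) (0 : Int)
        :: array.map (fun v => 0 :: v.take m ++ [(0 : Int)])
        ++ [List.replicate (m + 2) (0 : Int)] := by
  unfold add_zeros_around
  rw [hy, aza_aux array m hrect array.length le_rfl,
      List.take_of_length_le le_rfl, Nat.sub_self]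
  rfl

lemma padded_getD (array : List (List Int)) (m : Nat) (r : Nat) :
    ((List.replicate (m + 2) (0 : Int)
        :: array.map (fun v => 0 :: v.take m ++ [(0 : Int)])
        ++ [List.replicate (m + 2) (0 : Int)]).getD r [])
      = if r = 0 then List.replicate (m + 2) (0 : Int)
        else if r ≤ array.length then 0 :: (array.getD (r - 1) []).take m ++ [(0 : Int)]
        else if r = array.length + 1 then List.replicate (m + 2) (0 : Int)
        else [] := by
  cases r with
  | zero =>
    rw [List.getD_append _ _ _ _ (by simp), if_pos rfl]
    exact List.getD_cons_zero
  | succ r =>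
    by_cases h1 : r < array.length
    · rw [List.getD_append _ _ _ _ (by simp; omega), List.getD_cons_succ]
      rw [List.getD_eq_getElem _ _ (by simpa using h1)]
      simp only [List.getElem_map]
      rw [if_neg (by omega), if_pos (by omega),
          show r + 1 - 1 = r by omega, List.getD_eq_getElem _ _ h1]
    · rw [List.getD_append_right _ _ _ _ (by simp; omega)]
      by_cases h2 : r = array.length
      · subst h2
        rw [show array.length + 1 - (List.replicate (m + 2) (0:Int)
              :: array.map (fun v => 0 :: v.take m ++ [(0 : Int)])).length = 0 by simp]
        rw [if_neg (by omega), if_neg (by omega), if_pos rfl]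
        exact List.getD_cons_zero
      · rw [if_neg (by omega), if_neg (by omega), if_neg (by omega)]
        rw [List.getD_eq_getElem?_getD, List.getElem?_eq_none (by simp; omega)]
        rfl

lemma padded_row_len (array : List (List Int)) (m : Nat)
    (hrect : ∀ row ∈ array, m ≤ row.length) (r : Nat) (hr : r ≤ array.length + 1) :
    ((List.replicate (m + 2) (0 : Int)
        :: array.map (fun v => 0 :: v.take m ++ [(0 : Int)])
        ++ [List.replicate (m + 2) (0 : Int)]).getD r []).length = m + 2 := by
  rw [padded_getD]
  split_ifs with h0 h1 h2
  · simp
  · have := getD_len_ge array m (r - 1) hrect (by omega)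
    simp only [List.length_cons, List.length_append, List.length_cons, List.length_nil,
      List.length_take]
    omega
  · simp
  · omega

lemma pad_getD (v : List Int) (m c : Nat) (hv : m ≤ v.length) (hc : c ≤ m + 1) :
    (0 :: v.take m ++ [(0 : Int)]).getD c 0
      = if 1 ≤ c ∧ c ≤ m then v.getD (c - 1) 0 else 0 := by
  cases c with
  | zero =>
    rw [List.getD_append _ _ _ _ (by simp), if_neg (by omega)]
    rfl
  | succ c =>
    by_cases h : c < m
    · rw [List.getD_append _ _ _ _ (by simp; omega), List.getD_cons_succ,
          if_pos (by omega)]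
      rw [List.getD_eq_getElem _ _ (by simp; omega), List.getElem_take,
          List.getD_eq_getElem _ _ (by omega)]
      simp
    · rw [List.getD_append_right _ _ _ _ (by simp; omega), if_neg (by omega)]
      rcases Nat.exists_eq_add_of_le (show (0 :: v.take m).length ≤ c + 1 by simp; omega)
        with ⟨k, hk⟩
      rw [hk, Nat.add_sub_cancel_left]
      cases k <;> rfl

-- entries of the padded array, at Int indices as both ports read them
lemma aza_getD (array : List (List Int)) (m : Nat)
    (hrect : ∀ row ∈ array, m ≤ row.length)
    (hy : ((PySem.List.pyGet? array 0).getD []).length = m)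
    (r c : Int) (hr0 : 0 ≤ r) (hr : r ≤ (array.length : Int) + 1)
    (hc0 : 0 ≤ c) (hc : c ≤ (m : Int) + 1) :
    ((add_zeros_around array).getD r.toNat []).getD c.toNat 0
      = pcell array array.length m r c := by
  rw [aza_eq array m hrect hy, padded_getD]
  by_cases h0 : r.toNat = 0
  · rw [if_pos h0]
    unfold pcell
    rw [if_neg (by omega), List.getD_replicate _ (by omega)]
  · by_cases h1 : r.toNat ≤ array.length
    · rw [if_neg h0, if_pos h1,
          pad_getD _ m _ (getD_len_ge array m (r.toNat - 1) hrect (by omega)) (by omega)]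
      unfold pcell
      by_cases h3 : 1 ≤ c.toNat ∧ c.toNat ≤ m
      · rw [if_pos h3, if_pos (by omega :
          (1:Int) ≤ r ∧ r ≤ (array.length : Int) ∧ (1:Int) ≤ c ∧ c ≤ (m : Int))]
        rw [show (r - 1).toNat = r.toNat - 1 by omega,
            show (c - 1).toNat = c.toNat - 1 by omega]
      · rw [if_neg h3, if_neg (by omega)]
    · rw [if_neg h0, if_neg h1, if_pos (by omega)]
      unfold pcell
      rw [if_neg (by omega), List.getD_replicate _ (by omega)]

-- B's edge cell equals the padded-grid cell value
lemma esaCell_eq_pcell (array : List (List Int)) (m : Nat) (r c : Int) :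
    esaCell array (array.length : Int) (m : Int) r c = pcell array array.length m r c := by
  unfold esaCell pcell
  split_ifs with h
  · obtain ⟨h1, h2, h3, h4⟩ := h
    rw [show r - 1 = (((r - 1).toNat : Nat) : Int) by omega, PySem.List.pyGet?_natCast,
        show c - 1 = (((c - 1).toNat : Nat) : Int) by omega, PySem.List.pyGet?_natCast]
    rw [List.getElem?_eq_getElem (show (r - 1).toNat < array.length by omega)]
    simp [List.getD_eq_getElem?_getD]
    rw [List.getElem?_eq_getElem (show r.toNat - 1 < array.length by omega),
        Option.getD_some]
  · rfl

-- a bounded slice is the map of getD over its clamped index range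
lemma drop_take_eq_map_range {α : Type} (d : α) (l : List α) (p k : Nat)
    (h : p + k ≤ l.length) :
    (l.drop p).take k = (List.range k).map (fun t => l.getD (p + t) d) := by
  apply List.ext_getElem
  · simp
    omega
  · intro t h1 h2
    simp only [List.getElem_take, List.getElem_drop, List.getElem_map, List.getElem_range]
    rw [List.getD_eq_getElem _ _ (by simp at h1; omega)]

lemma slice_eq_map {α : Type} (d : α) (l : List α) (a b : Int) :
    PySem.List.slice l (some a) (some b)
      = (PySem.List.pyRange ((PySem.List.clampIdx l.length a : Nat) : Int)
            ((PySem.List.clampIdx l.length b : Nat) : Int)).map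
          (fun r => l.getD r.toNat d) := by
  rw [PySem.List.pyRange_one, List.map_map]
  have ha := PySem.List.clampIdx_le l.length a
  have hb := PySem.List.clampIdx_le l.length b
  show (l.drop (PySem.List.clampIdx l.length a)).take
      (PySem.List.clampIdx l.length b - PySem.List.clampIdx l.length a) = _
  rw [drop_take_eq_map_range d l (PySem.List.clampIdx l.length a)
        (PySem.List.clampIdx l.length b - PySem.List.clampIdx l.length a) (by omega)]
  rw [show (((PySem.List.clampIdx l.length b : Nat) : Int)
        - ((PySem.List.clampIdx l.length a : Nat) : Int)).toNat
      = PySem.List.clampIdx l.length b - PySem.List.clampIdx l.length a by omega]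
  apply List.map_congr_left
  intro t _
  simp only [Function.comp_apply]
  rw [show (((PySem.List.clampIdx l.length a : Nat) : Int) + (t : Int)).toNat
      = PySem.List.clampIdx l.length a + t by omega]

-- a slice of rangeInts n is the pyRange of the clamped bounds
lemma slice_rangeInts (n : Nat) (a b : Int) :
    PySem.List.slice (rangeInts n) (some a) (some b)
      = PySem.List.pyRange ((PySem.List.clampIdx n a : Nat) : Int)
          ((PySem.List.clampIdx n b : Nat) : Int) := by
  have hlen : (rangeInts n).length = n := by rw [rangeInts, PySem.List.length_pyRange_one]; omega
  rw [slice_eq_map (0 : Int) (rangeInts n) a b, hlen]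
  have ha := PySem.List.clampIdx_le n a
  have hb := PySem.List.clampIdx_le n b
  conv_rhs => rw [← List.map_id (PySem.List.pyRange _ _)]
  apply List.map_congr_left
  intro r hr
  rw [PySem.List.mem_pyRange_one] at hr
  have hr0 : 0 ≤ r := le_trans (by positivity) hr.1
  have hrlt : r < (n : Int) := lt_of_lt_of_le hr.2 (by exact_mod_cast hb)
  have hlt : r.toNat < n := by omega
  rw [rangeInts, List.getD_eq_getElem _ _ (by rw [PySem.List.length_pyRange_one]; omega),
      PySem.List.getElem_pyRange_one, id_eq]
  omega

-- ===== VERDICT (by name: the statement is the Claim_ definition above) =====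
theorem extract_sub_array_spec : Claim_equal_extract_sub_array := by
  unfold Claim_equal_extract_sub_array
  intro array i j _ hpre
  obtain ⟨hne, hrows⟩ := hpre
  have hy : ((PySem.List.pyGet? array 0).getD []).length = (array.headD []).length := by
    cases array with
    | nil => exact absurd rfl hne
    | cons a t =>
      rw [show (0:Int) = ((0:Nat):Int) from rfl, PySem.List.pyGet?_natCast]
      rfl
  unfold Spec_extract_sub_array
  unfold extract_sub_array extract_sub_array_alt
  rw [hy]
  by_cases hedge : i * j = 0 ∨
      ((array.length : Int) - 1 - i) * (((array.headD []).length : Int) - 1 - j) = 0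
  · rw [if_pos hedge, if_pos hedge]
    have hrect : ∀ row ∈ array, (array.headD []).length ≤ row.length := hrows hedge
    have hElen : (add_zeros_around array).length = array.length + 2 := by
      rw [aza_eq array _ hrect hy]
      simp
    show (PySem.List.slice (add_zeros_around array) (some i) (some (i + 3))).map
          (fun row => PySem.List.slice row (some j) (some (j + 3))) = _
    rw [slice_eq_map [] (add_zeros_around array) i (i + 3), hElen]
    rw [slice_rangeInts (array.length + 2) i (i + 3),
        slice_rangeInts ((array.headD []).length + 2) j (j + 3), List.map_map]
    apply List.map_congr_left
    intro r hr
    rw [PySem.List.mem_pyRange_one] at hr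
    have hr0 : 0 ≤ r := le_trans (by positivity) hr.1
    simp only [Function.comp_apply]
    have hrlt : r < ((array.length + 2 : Nat) : Int) :=
      lt_of_lt_of_le hr.2 (by exact_mod_cast PySem.List.clampIdx_le _ _)
    have hrowlen : ((add_zeros_around array).getD r.toNat []).length
        = (array.headD []).length + 2 := by
      rw [aza_eq array _ hrect hy]
      exact padded_row_len array _ hrect r.toNat (by omega)
    rw [slice_eq_map 0 ((add_zeros_around array).getD r.toNat []) j (j + 3), hrowlen]
    apply List.map_congr_left
    intro c hc
    rw [PySem.List.mem_pyRange_one] at hc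
    have hc0 : 0 ≤ c := le_trans (by positivity) hc.1
    have hclt : c < (((array.headD []).length + 2 : Nat) : Int) :=
      lt_of_lt_of_le hc.2 (by exact_mod_cast PySem.List.clampIdx_le _ _)
    rw [aza_getD array _ hrect hy r c hr0 (by push_cast at hrlt ⊢; omega)
          hc0 (by push_cast at hclt ⊢; omega)]
    exact (esaCell_eq_pcell array _ r c).symm
  · rw [if_neg hedge, if_neg hedge]
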